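-- pv_equiv track=rewrite | github.com/BorisTheBrave/sylves | upm_release.py | preprocess_cs_file
-- ===== SOURCE A (Python) =====
-- from typing import List, IO, Tuple
--
-- KEEP="KEEP"
--
-- def parse_if(line) -> Tuple[str, bool]:
--     expr = line.strip()
--     invert = False
--     if expr.startswith("!"):
--         invert = True
--         expr = expr[1:]
--     return (expr, invert)
--
-- def preprocess_cs_file(lines: List[str], defines: List[str], keep_defines: List[str]):
--     if_state = []
--     for line in lines:
--         stripped_line = line
--         if stripped_line.startswith("#if"):
--             (expr, invert) = parse_if(stripped_line[3:])
--             if expr in keep_defines: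
--                 if_state.append(KEEP)
--             else:
--                 if_state.append(invert ^ (expr in defines))
--                 continue
--         elif stripped_line.startswith("#else"):
--             if if_state[-1] is KEEP:
--                 pass
--             else:
--                 if_state[-1] = not if_state[-1]
--                 continue
--         elif stripped_line.startswith("#endif"):
--             if if_state[-1] is KEEP:
--                 if_state.pop()
--             else:
--                 if_state.pop()
--                 continue
--         elif stripped_line.startswith("#pragma") or stripped_line.startswith("#region") or stripped_line.startswith("#endregion"):
--             pass
--         elif stripped_line.startswith("#"):
--             raise Exception("Unknown directive: "+ line)
--         if False not in if_state:
--             yield line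
-- ===== SOURCE B (Python) =====
-- # B: recursive-descent over the nested #if structure instead of A's flat stack machine:
-- # a sequence scanner and a branch parser recurse into each conditional block carrying one
-- # visibility flag, so there is no stack, no KEEP sentinel and no per-line stack scan.
--
-- def _eval_if(line, defines, keep_defines):
--     # None means "KEEP: keep the directive text itself"; otherwise the branch's truth value
--     expr = line[3:].strip()
--     invert = expr.startswith("!")
--     if invert:
--         expr = expr[1:]
--     if expr in keep_defines:
--         return None
--     return invert != (expr in defines)
--
-- def _seq(lines, i, visible, out, defines, keep_defines):
--     # scan from index i up to an unmatched #else/#endif, appending visible lines to out;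
--     # returns (index of the terminator or len(lines), kind)
--     n = len(lines)
--     while i < n:
--         line = lines[i]
--         if line.startswith("#if"):
--             cond = _eval_if(line, defines, keep_defines)
--             if cond is None and visible:
--                 out.append(line)
--             i = _branch(lines, i + 1, visible, cond, out, defines, keep_defines)
--         elif line.startswith("#else"):
--             return i, 'else'
--         elif line.startswith("#endif"):
--             return i, 'endif'
--         elif line.startswith("#pragma") or line.startswith("#region") or line.startswith("#endregion"):
--             if visible:
--                 out.append(line)
--             i += 1
--         elif line.startswith("#"):
--             raise Exception("Unknown directive: " + line)
--         else:
--             if visible: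
--                 out.append(line)
--             i += 1
--     return i, 'end'
--
-- def _branch(lines, i, visible, cond, out, defines, keep_defines):
--     # one conditional block: its branches up to and including its #endif; returns next index
--     while True:
--         inner = visible if cond is None else (visible and cond)
--         i, kind = _seq(lines, i, inner, out, defines, keep_defines)
--         if kind == 'end':
--             return i
--         if cond is None and visible:
--             out.append(lines[i])   # the #else/#endif line of a KEEP block stays in the output
--         if kind == 'endif':
--             return i + 1
--         if cond is not None:       # 'else': flip the branch value (KEEP stays KEEP)
--             cond = not cond
--         i += 1
--
-- def preprocess_cs_file(lines, defines, keep_defines):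
--     out = []
--     i, kind = _seq(lines, 0, True, out, defines, keep_defines)
--     if kind != 'end':
--         raise IndexError("unmatched directive: " + lines[i])
--     yield from out
-- ===== Notes on version B (the rewrite author's own statement) =====
-- stated objective: alternative
-- what changed: B replaces A's flat stack machine (a list of KEEP/bool flags scanned per line with 'False not in if_state') by a recursive-descent parser over the nested #if structure: a sequence parser and a branch parser recurse into each conditional block carrying a single visibility flag, so there is no stack, no KEEP sentinel and no per-line stack membership scan.
import Mathlib
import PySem

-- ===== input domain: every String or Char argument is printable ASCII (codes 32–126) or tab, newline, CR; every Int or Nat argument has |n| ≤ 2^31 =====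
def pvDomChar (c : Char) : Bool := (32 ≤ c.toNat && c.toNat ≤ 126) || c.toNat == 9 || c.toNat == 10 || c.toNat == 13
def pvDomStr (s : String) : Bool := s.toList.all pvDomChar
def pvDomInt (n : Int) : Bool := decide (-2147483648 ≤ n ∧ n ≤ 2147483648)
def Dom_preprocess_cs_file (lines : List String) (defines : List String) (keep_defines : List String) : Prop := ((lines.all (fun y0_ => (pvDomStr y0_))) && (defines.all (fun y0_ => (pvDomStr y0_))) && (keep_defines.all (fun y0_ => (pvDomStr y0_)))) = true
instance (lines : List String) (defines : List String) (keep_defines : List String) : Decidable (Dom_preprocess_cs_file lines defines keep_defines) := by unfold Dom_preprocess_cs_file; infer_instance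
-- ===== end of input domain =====

-- B is a recursive-descent parser over the nested #if structure (no stack, no KEEP sentinel,
-- no per-line stack scan) instead of A's flat stack machine; alternative structure, same cost class.
-- Both Pythons are generators; the equivalence is about the list of yielded lines.

-- ===== PORT A =====
-- stack entry: the KEEP sentinel or a bool; Python pushes/pops at the list END, here the HEAD
inductive PPEntry | keep | flag : Bool → PPEntry
deriving DecidableEq, Repr

def parse_if (line : String) : String × Bool :=
  let expr := PySem.Str.strip line
  if PySem.Str.startswith expr "!" then (PySem.Str.slice expr (some 1) none, true)
  else (expr, false)

def pvAStep (defines keep_defines : List String) (st : List PPEntry × List String) (line : String) : List PPEntry × List String :=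
  let (if_state, out) := st
  if PySem.Str.startswith line "#if" then
    let (expr, invert) := parse_if (PySem.Str.slice line (some 3) none)
    if keep_defines.contains expr then
      let s := PPEntry.keep :: if_state
      (s, if s.contains (PPEntry.flag false) then out else out ++ [line])
    else
      (PPEntry.flag (invert != defines.contains expr) :: if_state, out)     -- continue
  else if PySem.Str.startswith line "#else" then
    match if_state with
    | PPEntry.keep :: _ =>
        (if_state, if if_state.contains (PPEntry.flag false) then out else out ++ [line])
    | PPEntry.flag b :: rest => (PPEntry.flag (!b) :: rest, out)            -- continue
    | [] => (if_state, out)   -- Python raises IndexError here; excluded by Pre_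
  else if PySem.Str.startswith line "#endif" then
    match if_state with
    | PPEntry.keep :: rest =>
        (rest, if rest.contains (PPEntry.flag false) then out else out ++ [line])
    | PPEntry.flag _ :: rest => (rest, out)                                 -- continue
    | [] => (if_state, out)   -- Python raises IndexError here; excluded by Pre_
  else if PySem.Str.startswith line "#pragma" || PySem.Str.startswith line "#region" || PySem.Str.startswith line "#endregion" then
    (if_state, if if_state.contains (PPEntry.flag false) then out else out ++ [line])
  else if PySem.Str.startswith line "#" then
    (if_state, out)           -- Python raises Exception here; excluded by Pre_
  else
    (if_state, if if_state.contains (PPEntry.flag false) then out else out ++ [line])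

def preprocess_cs_file (lines : List String) (defines : List String) (keep_defines : List String) : List String :=
  (List.foldl (pvAStep defines keep_defines) ([], []) lines).2

-- ===== PORT B =====
inductive BKind | bend | belse | bendif
deriving DecidableEq, Repr

-- B's _eval_if: none = KEEP the directive text, some b = the branch's truth value
def pvEvalIf (defines keep_defines : List String) (line : String) : Option Bool :=
  let expr := PySem.Str.strip (PySem.Str.slice line (some 3) none)
  let invert := PySem.Str.startswith expr "!"
  let expr := if invert then PySem.Str.slice expr (some 1) none else expr
  if keep_defines.contains expr then none
  else some (invert != defines.contains expr)

-- B's _seq/_branch. The Nat argument is FUEL, a termination device only: every recursive call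
-- gets fuel-1 and 2*len+1 (resp. 2*len+2) fuel is proved sufficient below, so with the fuel the
-- wrapper passes these compute exactly what Python B's unbounded recursion computes.
mutual
def pvSeq (defines keep_defines : List String) : Nat → List String → Bool → List String × List String × BKind
  | 0, _, _ => ([], [], .bend)
  | _+1, [], _ => ([], [], .bend)
  | f+1, line :: r, visible =>
    if PySem.Str.startswith line "#if" then
      let cond := pvEvalIf defines keep_defines line
      let head := if cond == none && visible then [line] else []
      let (em, rem) := pvBranch defines keep_defines f r visible cond
      let (tail, rem2, kind) := pvSeq defines keep_defines f rem visible
      (head ++ em ++ tail, rem2, kind)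
    else if PySem.Str.startswith line "#else" then ([], line :: r, .belse)
    else if PySem.Str.startswith line "#endif" then ([], line :: r, .bendif)
    else if PySem.Str.startswith line "#pragma" || PySem.Str.startswith line "#region" || PySem.Str.startswith line "#endregion" then
      let (tail, rem, kind) := pvSeq defines keep_defines f r visible
      ((if visible then [line] else []) ++ tail, rem, kind)
    else if PySem.Str.startswith line "#" then
      pvSeq defines keep_defines f r visible    -- Python B raises Exception here; excluded by Pre_
    else
      let (tail, rem, kind) := pvSeq defines keep_defines f r visible
      ((if visible then [line] else []) ++ tail, rem, kind)

def pvBranch (defines keep_defines : List String) : Nat → List String → Bool → Option Bool → List String × List String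
  | 0, _, _, _ => ([], [])
  | f+1, rest, visible, cond =>
    let inner := match cond with | none => visible | some b => visible && b
    match pvSeq defines keep_defines f rest inner with
    | (em, l :: t, .belse) =>
      let head := if cond == none && visible then [l] else []
      let cond' := match cond with | none => none | some b => some (!b)
      let (more, rem2) := pvBranch defines keep_defines f t visible cond'
      (em ++ head ++ more, rem2)
    | (em, l :: t, .bendif) =>
      (em ++ (if cond == none && visible then [l] else []), t)
    | (em, rem, _) => (em, rem)    -- input ended inside the block (or unreachable shapes)
end

def preprocess_cs_file_alt (lines : List String) (defines : List String) (keep_defines : List String) : List String :=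
  -- Python B raises IndexError when the kind is not 'end'; those inputs are excluded by Pre_
  (pvSeq defines keep_defines (2 * lines.length + 1) lines true).1

-- ===== PRECONDITION & SPEC =====
-- directive-balance scan: depth of open #if blocks; #else/#endif need an open block
def pvPreScan : List String → Nat → Bool
  | [], _ => true
  | line :: rest, d =>
    if PySem.Str.startswith line "#if" then pvPreScan rest (d + 1)
    else if PySem.Str.startswith line "#else" then decide (0 < d) && pvPreScan rest d
    else if PySem.Str.startswith line "#endif" then decide (0 < d) && pvPreScan rest (d - 1)
    else if PySem.Str.startswith line "#pragma" || PySem.Str.startswith line "#region" || PySem.Str.startswith line "#endregion" then pvPreScan rest d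
    else if PySem.Str.startswith line "#" then false
    else pvPreScan rest d

-- Pre_ excludes exactly the inputs on which Python A raises: a line starting with "#" that is
-- no known directive (Exception), or a "#else"/"#endif" with no open "#if" (IndexError).
def Pre_preprocess_cs_file (lines : List String) (defines : List String) (keep_defines : List String) : Prop :=
  pvPreScan lines 0 = true
instance (lines : List String) (defines : List String) (keep_defines : List String) : Decidable (Pre_preprocess_cs_file lines defines keep_defines) := by unfold Pre_preprocess_cs_file; infer_instance

def pvWitness_preprocess_cs_file : List String × List String × List String :=
  (["#if FOO", "x", "#else", "y", "#endif", "#if KEEPME", "z", "#endif"], ["FOO"], ["KEEPME"])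

def Spec_preprocess_cs_file (lines : List String) (defines : List String) (keep_defines : List String) (out : List String) : Prop := out = preprocess_cs_file_alt lines defines keep_defines
instance (lines : List String) (defines : List String) (keep_defines : List String) (out : List String) : Decidable (Spec_preprocess_cs_file lines defines keep_defines out) := by unfold Spec_preprocess_cs_file; infer_instance

-- ===== CLAIM (what is proved, stated in full; the proofs are below) =====
def Claim_equal_preprocess_cs_file : Prop := ∀ (lines : List String) (defines : List String) (keep_defines : List String), Dom_preprocess_cs_file lines defines keep_defines → Pre_preprocess_cs_file lines defines keep_defines → Spec_preprocess_cs_file lines defines keep_defines (preprocess_cs_file lines defines keep_defines)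

-- ===== LEMMAS AND PROOFS =====

-- visibility of A's stack: no False flag on it
def pvVis (s : List PPEntry) : Bool := !(s.contains (PPEntry.flag false))

def pvToCond : PPEntry → Option Bool
  | .keep => none
  | .flag b => some b

theorem pvVis_keep (s : List PPEntry) : pvVis (PPEntry.keep :: s) = pvVis s := by
  simp [pvVis]

theorem pvVis_flag (s : List PPEntry) (b : Bool) : pvVis (PPEntry.flag b :: s) = (pvVis s && b) := by
  cases b <;> simp [pvVis]

theorem pv_emit (s : List PPEntry) (out : List String) (l : String) :
    (if s.contains (PPEntry.flag false) then out else out ++ [l])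
      = out ++ (if pvVis s then [l] else []) := by
  unfold pvVis
  by_cases hm : PPEntry.flag false ∈ s <;> simp [hm]

theorem pvEvalIf_eq (dfs kds : List String) (line : String) :
    pvEvalIf dfs kds line
      = (let p := parse_if (PySem.Str.slice line (some 3) none)
         if kds.contains p.1 then none else some (p.2 != dfs.contains p.1)) := by
  unfold pvEvalIf parse_if
  dsimp only
  by_cases h : PySem.Str.startswith (PySem.Str.strip (PySem.Str.slice line (some 3) none)) "!" = true
  · rw [if_pos h, if_pos h, h]
  · have h' : PySem.Str.startswith (PySem.Str.strip (PySem.Str.slice line (some 3) none)) "!" = false := by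
      simpa using h
    rw [if_neg h, if_neg h, h']

-- the mutual-induction statements: B's seq/branch simulate A's fold
def pvSeqStmt (dfs kds : List String) (f : Nat) : Prop :=
  ∀ rest d (s : List PPEntry) out em rem kind,
    2 * rest.length + 1 ≤ f → pvPreScan rest d = true →
    pvSeq dfs kds f rest (pvVis s) = (em, rem, kind) →
    rem.length ≤ rest.length ∧
    ((kind = .bend ∧ rem = [] ∧ (List.foldl (pvAStep dfs kds) (s, out) rest).2 = out ++ em) ∨
     (kind ≠ .bend ∧ 0 < d ∧ pvPreScan rem d = true ∧
       ∃ l t, rem = l :: t ∧ PySem.Str.startswith l "#if" = false ∧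
         ((kind = .belse ∧ PySem.Str.startswith l "#else" = true) ∨
          (kind = .bendif ∧ PySem.Str.startswith l "#else" = false ∧ PySem.Str.startswith l "#endif" = true)) ∧
         List.foldl (pvAStep dfs kds) (s, out) rest = List.foldl (pvAStep dfs kds) (s, out ++ em) (l :: t)))

def pvBranchStmt (dfs kds : List String) (f : Nat) : Prop :=
  ∀ rest d (s : List PPEntry) (e : PPEntry) out em rem,
    2 * rest.length + 2 ≤ f → pvPreScan rest (d + 1) = true →
    pvBranch dfs kds f rest (pvVis s) (pvToCond e) = (em, rem) →
    rem.length ≤ rest.length ∧ pvPreScan rem d = true ∧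
    ((rem = [] ∧ (List.foldl (pvAStep dfs kds) (e :: s, out) rest).2 = out ++ em) ∨
     List.foldl (pvAStep dfs kds) (e :: s, out) rest = List.foldl (pvAStep dfs kds) (s, out ++ em) rem)

-- A-step characterisations (one per directive shape), phrased through pvVis
theorem pvA_plain (dfs kds : List String) (s : List PPEntry) (out : List String) (line : String)
    (h1 : PySem.Str.startswith line "#if" = false)
    (h2 : PySem.Str.startswith line "#else" = false)
    (h3 : PySem.Str.startswith line "#endif" = false)
    (h45 : (PySem.Str.startswith line "#pragma" || PySem.Str.startswith line "#region" || PySem.Str.startswith line "#endregion") = true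
           ∨ PySem.Str.startswith line "#" = false) :
    pvAStep dfs kds (s, out) line = (s, out ++ (if pvVis s then [line] else [])) := by
  unfold pvAStep
  dsimp only
  rw [if_neg (by simpa using h1), if_neg (by simpa using h2), if_neg (by simpa using h3)]
  by_cases h4 : (PySem.Str.startswith line "#pragma" || PySem.Str.startswith line "#region" || PySem.Str.startswith line "#endregion") = true
  · rw [if_pos h4, pv_emit]
  · rcases h45 with h4' | h5
    · exact absurd h4' h4
    · rw [if_neg h4, if_neg (by simpa using h5), pv_emit]

theorem pvA_if_keep (dfs kds : List String) (s : List PPEntry) (out : List String) (line : String)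
    (e : String) (i : Bool)
    (h1 : PySem.Str.startswith line "#if" = true)
    (hpe : parse_if (PySem.Str.slice line (some 3) none) = (e, i))
    (hk : kds.contains e = true) :
    pvAStep dfs kds (s, out) line = (PPEntry.keep :: s, out ++ (if pvVis s then [line] else [])) := by
  unfold pvAStep
  dsimp only
  rw [if_pos h1, hpe]
  dsimp only
  rw [if_pos hk, pv_emit, pvVis_keep]

theorem pvA_if_flag (dfs kds : List String) (s : List PPEntry) (out : List String) (line : String)
    (e : String) (i : Bool)
    (h1 : PySem.Str.startswith line "#if" = true)
    (hpe : parse_if (PySem.Str.slice line (some 3) none) = (e, i))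
    (hk : kds.contains e = false) :
    pvAStep dfs kds (s, out) line = (PPEntry.flag (i != dfs.contains e) :: s, out) := by
  unfold pvAStep
  dsimp only
  rw [if_pos h1, hpe]
  dsimp only
  rw [if_neg (by simpa using hk)]

theorem pvA_else_keep (dfs kds : List String) (s : List PPEntry) (out : List String) (line : String)
    (h1 : PySem.Str.startswith line "#if" = false)
    (h2 : PySem.Str.startswith line "#else" = true) :
    pvAStep dfs kds (PPEntry.keep :: s, out) line = (PPEntry.keep :: s, out ++ (if pvVis s then [line] else [])) := by
  unfold pvAStep
  dsimp only
  rw [if_neg (by simpa using h1), if_pos h2]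
  rw [pv_emit, pvVis_keep]

theorem pvA_else_flag (dfs kds : List String) (s : List PPEntry) (out : List String) (line : String) (b : Bool)
    (h1 : PySem.Str.startswith line "#if" = false)
    (h2 : PySem.Str.startswith line "#else" = true) :
    pvAStep dfs kds (PPEntry.flag b :: s, out) line = (PPEntry.flag (!b) :: s, out) := by
  unfold pvAStep
  dsimp only
  rw [if_neg (by simpa using h1), if_pos h2]

theorem pvA_endif_keep (dfs kds : List String) (s : List PPEntry) (out : List String) (line : String)
    (h1 : PySem.Str.startswith line "#if" = false)
    (h2 : PySem.Str.startswith line "#else" = false)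
    (h3 : PySem.Str.startswith line "#endif" = true) :
    pvAStep dfs kds (PPEntry.keep :: s, out) line = (s, out ++ (if pvVis s then [line] else [])) := by
  unfold pvAStep
  dsimp only
  rw [if_neg (by simpa using h1), if_neg (by simpa using h2), if_pos h3]
  rw [pv_emit]

theorem pvA_endif_flag (dfs kds : List String) (s : List PPEntry) (out : List String) (line : String) (b : Bool)
    (h1 : PySem.Str.startswith line "#if" = false)
    (h2 : PySem.Str.startswith line "#else" = false)
    (h3 : PySem.Str.startswith line "#endif" = true) :
    pvAStep dfs kds (PPEntry.flag b :: s, out) line = (s, out) := by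
  unfold pvAStep
  dsimp only
  rw [if_neg (by simpa using h1), if_neg (by simpa using h2), if_pos h3]

-- combine a branch result and the continuation seq result (the #if case of the induction)
theorem pv_if_combine (dfs kds : List String) (f : Nat) (d : Nat) (r : List String)
    (s : List PPEntry) (e : PPEntry) (out head emB remB tail rem2 : List String) (kind2 : BKind)
    (ihS : pvSeqStmt dfs kds f) (ihB : pvBranchStmt dfs kds f)
    (hf : 2 * r.length + 2 ≤ f)
    (hscan : pvPreScan r (d + 1) = true)
    (hbr : pvBranch dfs kds f r (pvVis s) (pvToCond e) = (emB, remB))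
    (hsq : pvSeq dfs kds f remB (pvVis s) = (tail, rem2, kind2)) :
    rem2.length ≤ r.length ∧
    ((kind2 = .bend ∧ rem2 = [] ∧ (List.foldl (pvAStep dfs kds) (e :: s, out ++ head) r).2 = out ++ (head ++ emB ++ tail)) ∨
     (kind2 ≠ .bend ∧ 0 < d ∧ pvPreScan rem2 d = true ∧
       ∃ l t, rem2 = l :: t ∧ PySem.Str.startswith l "#if" = false ∧
         ((kind2 = .belse ∧ PySem.Str.startswith l "#else" = true) ∨
          (kind2 = .bendif ∧ PySem.Str.startswith l "#else" = false ∧ PySem.Str.startswith l "#endif" = true)) ∧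
         List.foldl (pvAStep dfs kds) (e :: s, out ++ head) r
           = List.foldl (pvAStep dfs kds) (s, out ++ (head ++ emB ++ tail)) (l :: t))) := by
  obtain ⟨hlen1, hscan1, hbc⟩ := ihB r d s e (out ++ head) emB remB hf hscan hbr
  obtain ⟨hlen2, hsc⟩ := ihS remB d s (out ++ head ++ emB) tail rem2 kind2 (by omega) hscan1 hsq
  refine ⟨by omega, ?_⟩
  rcases hbc with ⟨hre, hfb⟩ | hfb
  · subst hre
    rcases hsc with ⟨hk2, hr2, hfe⟩ | ⟨_, _, _, l, t, hrt, _⟩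
    · have htail : tail = [] := by
        have h0 : out ++ head ++ emB = out ++ head ++ emB ++ tail := by simpa using hfe
        have := congrArg List.length h0
        simp at this
        exact this
      subst htail
      exact Or.inl ⟨hk2, hr2, by simpa [List.append_assoc] using hfb⟩
    · exfalso
      rw [hrt] at hlen2
      simp at hlen2
  · rcases hsc with ⟨hk2, hr2, hfe⟩ | ⟨hk2, hd, hs2, l, t, hrt, hlif, hkinds, hface⟩
    · refine Or.inl ⟨hk2, hr2, ?_⟩
      have := congrArg Prod.snd hfb
      simp only [this]
      simpa [List.append_assoc] using hfe
    · refine Or.inr ⟨hk2, hd, hs2, l, t, hrt, hlif, hkinds, ?_⟩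
      rw [hfb, hface]
      simp [List.append_assoc]

theorem pv_mega (dfs kds : List String) : ∀ f, pvSeqStmt dfs kds f ∧ pvBranchStmt dfs kds f := by
  intro f
  induction f with
  | zero =>
    constructor
    · intro rest d s out em rem kind hf
      exact (Nat.not_succ_le_zero _ hf).elim
    · intro rest d s e out em rem hf
      exact (Nat.not_succ_le_zero _ (Nat.le_of_succ_le hf)).elim
  | succ f ih =>
    obtain ⟨ihS, ihB⟩ := ih
    constructor
    · -- pvSeqStmt (f+1)
      intro rest d s out em rem kind hf hscan heq
      cases rest with
      | nil =>
        rw [pvSeq] at heq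
        simp only [Prod.mk.injEq] at heq
        obtain ⟨rfl, rfl, rfl⟩ := heq
        exact ⟨Nat.le_refl _, Or.inl ⟨rfl, rfl, by simp⟩⟩
      | cons line r =>
        simp only [List.length_cons] at hf
        rw [pvSeq] at heq
        rw [pvPreScan] at hscan
        by_cases h1 : PySem.Str.startswith line "#if" = true
        · -- #if: recurse into the branch, then the continuation
          rw [if_pos h1] at heq
          rw [if_pos h1] at hscan
          dsimp only at heq
          rcases hbr : pvBranch dfs kds f r (pvVis s) (pvEvalIf dfs kds line) with ⟨emB, remB⟩
          rw [hbr] at heq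
          dsimp only at heq
          rcases hsq : pvSeq dfs kds f remB (pvVis s) with ⟨tail, rem2, kind2⟩
          rw [hsq] at heq
          simp only [Prod.mk.injEq] at heq
          obtain ⟨rfl, rfl, rfl⟩ := heq
          rcases hpe : parse_if (PySem.Str.slice line (some 3) none) with ⟨e, i⟩
          have hev : pvEvalIf dfs kds line
              = (if kds.contains e then none else some (i != dfs.contains e)) := by
            rw [pvEvalIf_eq, hpe]
          by_cases hk : kds.contains e = true
          · -- KEEP branch
            have hcond : pvEvalIf dfs kds line = none := by rw [hev, if_pos hk]
            rw [hcond] at hbr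
            have hbr' : pvBranch dfs kds f r (pvVis s) (pvToCond PPEntry.keep) = (emB, remB) := hbr
            have hcomb := pv_if_combine dfs kds f d r s PPEntry.keep out
              (if pvVis s then [line] else []) emB remB tail rem2 kind2 ihS ihB (by omega) hscan hbr' hsq
            have hstep : pvAStep dfs kds (s, out) line
                = (PPEntry.keep :: s, out ++ (if pvVis s then [line] else [])) :=
              pvA_if_keep dfs kds s out line e i h1 hpe hk
            have hhead : (if pvEvalIf dfs kds line == none && pvVis s then [line] else [])
                = (if pvVis s then [line] else []) := by
              rw [hcond]; cases pvVis s <;> simp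
            rw [hhead]
            constructor
            · have := hcomb.1; simp; omega
            · have h2 := hcomb.2
              rw [List.foldl_cons, hstep]
              exact h2
          · -- plain conditional branch
            have hk' : kds.contains e = false := by simpa using hk
            have hcond : pvEvalIf dfs kds line = some (i != dfs.contains e) := by
              rw [hev, if_neg (by simpa using hk')]
            rw [hcond] at hbr
            have hbr' : pvBranch dfs kds f r (pvVis s) (pvToCond (PPEntry.flag (i != dfs.contains e))) = (emB, remB) := hbr
            have hcomb := pv_if_combine dfs kds f d r s (PPEntry.flag (i != dfs.contains e)) out
              [] emB remB tail rem2 kind2 ihS ihB (by omega) hscan hbr' hsq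
            have hstep : pvAStep dfs kds (s, out) line
                = (PPEntry.flag (i != dfs.contains e) :: s, out) :=
              pvA_if_flag dfs kds s out line e i h1 hpe hk'
            have hhead : (if pvEvalIf dfs kds line == none && pvVis s then [line] else []) = ([] : List String) := by
              rw [hcond]; simp
            rw [hhead]
            constructor
            · have := hcomb.1; simp; omega
            · have h2 := hcomb.2
              rw [List.foldl_cons, hstep]
              simpa using h2
        · have h1' : PySem.Str.startswith line "#if" = false := by simpa using h1
          rw [if_neg (by simpa using h1')] at heq
          rw [if_neg (by simpa using h1')] at hscan
          by_cases h2 : PySem.Str.startswith line "#else" = true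
          · -- terminator: #else
            rw [if_pos h2] at heq
            rw [if_pos h2] at hscan
            simp only [Prod.mk.injEq] at heq
            obtain ⟨rfl, rfl, rfl⟩ := heq
            simp only [Bool.and_eq_true, decide_eq_true_eq] at hscan
            refine ⟨Nat.le_refl _, Or.inr ⟨by simp, hscan.1, ?_, line, r, rfl, h1', Or.inl ⟨rfl, h2⟩, by simp⟩⟩
            rw [pvPreScan]
            rw [if_neg (by simpa using h1'), if_pos h2]
            simp [hscan.1, hscan.2]
          · have h2' : PySem.Str.startswith line "#else" = false := by simpa using h2
            rw [if_neg (by simpa using h2')] at heq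
            rw [if_neg (by simpa using h2')] at hscan
            by_cases h3 : PySem.Str.startswith line "#endif" = true
            · -- terminator: #endif
              rw [if_pos h3] at heq
              rw [if_pos h3] at hscan
              simp only [Prod.mk.injEq] at heq
              obtain ⟨rfl, rfl, rfl⟩ := heq
              simp only [Bool.and_eq_true, decide_eq_true_eq] at hscan
              refine ⟨Nat.le_refl _, Or.inr ⟨by simp, hscan.1, ?_, line, r, rfl, h1', Or.inr ⟨rfl, h2', h3⟩, by simp⟩⟩
              rw [pvPreScan]
              rw [if_neg (by simpa using h1'), if_neg (by simpa using h2'), if_pos h3]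
              simp [hscan.1, hscan.2]
            · have h3' : PySem.Str.startswith line "#endif" = false := by simpa using h3
              rw [if_neg (by simpa using h3')] at heq
              rw [if_neg (by simpa using h3')] at hscan
              by_cases h4 : (PySem.Str.startswith line "#pragma" || PySem.Str.startswith line "#region" || PySem.Str.startswith line "#endregion") = true
              · -- pragma/region/endregion: plain line
                rw [if_pos h4] at heq
                rw [if_pos h4] at hscan
                rcases hsq : pvSeq dfs kds f r (pvVis s) with ⟨tail, rem2, kind2⟩
                rw [hsq] at heq
                simp only [Prod.mk.injEq] at heq
                obtain ⟨rfl, rfl, rfl⟩ := heq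
                obtain ⟨hlen, hsc⟩ := ihS r d s (out ++ (if pvVis s then [line] else [])) tail rem2 kind2 (by omega) hscan hsq
                have hstep := pvA_plain dfs kds s out line h1' h2' h3' (Or.inl h4)
                refine ⟨by simp; omega, ?_⟩
                rcases hsc with ⟨hk2, hr2, hfe⟩ | ⟨hk2, hd, hs2, l, t, hrt, hlif, hkinds, hface⟩
                · refine Or.inl ⟨hk2, hr2, ?_⟩
                  rw [List.foldl_cons, hstep]
                  simpa [List.append_assoc] using hfe
                · refine Or.inr ⟨hk2, hd, hs2, l, t, hrt, hlif, hkinds, ?_⟩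
                  rw [List.foldl_cons, hstep, hface]
                  simp [List.append_assoc]
              · have h4' : (PySem.Str.startswith line "#pragma" || PySem.Str.startswith line "#region" || PySem.Str.startswith line "#endregion") = false := by simpa using h4
                rw [if_neg (by simpa using h4')] at heq
                rw [if_neg (by simpa using h4')] at hscan
                by_cases h5 : PySem.Str.startswith line "#" = true
                · -- unknown directive: excluded by the scan hypothesis
                  rw [if_pos h5] at hscan
                  exact absurd hscan (by simp)
                · have h5' : PySem.Str.startswith line "#" = false := by simpa using h5
                  rw [if_neg (by simpa using h5')] at heq
                  rw [if_neg (by simpa using h5')] at hscan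
                  rcases hsq : pvSeq dfs kds f r (pvVis s) with ⟨tail, rem2, kind2⟩
                  rw [hsq] at heq
                  simp only [Prod.mk.injEq] at heq
                  obtain ⟨rfl, rfl, rfl⟩ := heq
                  obtain ⟨hlen, hsc⟩ := ihS r d s (out ++ (if pvVis s then [line] else [])) tail rem2 kind2 (by omega) hscan hsq
                  have hstep := pvA_plain dfs kds s out line h1' h2' h3' (Or.inr h5')
                  refine ⟨by simp; omega, ?_⟩
                  rcases hsc with ⟨hk2, hr2, hfe⟩ | ⟨hk2, hd, hs2, l, t, hrt, hlif, hkinds, hface⟩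
                  · refine Or.inl ⟨hk2, hr2, ?_⟩
                    rw [List.foldl_cons, hstep]
                    simpa [List.append_assoc] using hfe
                  · refine Or.inr ⟨hk2, hd, hs2, l, t, hrt, hlif, hkinds, ?_⟩
                    rw [List.foldl_cons, hstep, hface]
                    simp [List.append_assoc]
    · -- pvBranchStmt (f+1)
      intro rest d s e out em rem hf hscan heq
      rw [pvBranch.eq_def] at heq
      dsimp only at heq
      rcases hsq : pvSeq dfs kds f rest (pvVis (e :: s)) with ⟨em0, rem0, kind0⟩
      have hinner : (match pvToCond e with | none => pvVis s | some b => pvVis s && b) = pvVis (e :: s) := by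
        cases e
        · simp [pvToCond, pvVis_keep]
        · simp [pvToCond, pvVis_flag]
      rw [hinner, hsq] at heq
      obtain ⟨hlen0, hsc0⟩ := ihS rest (d + 1) (e :: s) out em0 rem0 kind0 (by omega) hscan hsq
      rcases hsc0 with ⟨hk0, hr0, hfold⟩ | ⟨hk0, _, hsr0, l, t, hrt, hlif, hkinds, hface⟩
      · -- input exhausted inside the block
        subst hk0; subst hr0
        dsimp only at heq
        simp only [Prod.mk.injEq] at heq
        obtain ⟨rfl, rfl⟩ := heq
        exact ⟨by simp, rfl, Or.inl ⟨rfl, hfold⟩⟩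
      · subst hrt
        rcases hkinds with ⟨hk0', hlelse⟩ | ⟨hk0', hlelse, hlendif⟩
        · -- terminator of this branch body: #else — flip and recurse
          subst hk0'
          dsimp only at heq
          rcases hbr2 : pvBranch dfs kds f t (pvVis s)
              (match pvToCond e with | none => none | some b => some (!b)) with ⟨more, rem2⟩
          rw [hbr2] at heq
          dsimp only at heq
          simp only [Prod.mk.injEq] at heq
          obtain ⟨rfl, rfl⟩ := heq
          have hscan2 : pvPreScan t (d + 1) = true := by
            rw [pvPreScan] at hsr0
            rw [if_neg (by simpa using hlif), if_pos hlelse] at hsr0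
            simp only [Bool.and_eq_true, decide_eq_true_eq] at hsr0
            exact hsr0.2
          cases e with
          | keep =>
            have hbr2' : pvBranch dfs kds f t (pvVis s) (pvToCond PPEntry.keep) = (more, rem2) := hbr2
            have hlen0' : t.length + 1 ≤ rest.length := by simpa using hlen0
            obtain ⟨hlen2, hscan3, hdisj⟩ := ihB t d s PPEntry.keep
              (out ++ em0 ++ (if pvVis s then [l] else [])) more rem2 (by omega) hscan2 hbr2'
            have hstep := pvA_else_keep dfs kds s (out ++ em0) l hlif hlelse
            have hhead : (if pvToCond PPEntry.keep == none && pvVis s then [l] else [])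
                = (if pvVis s then [l] else []) := by
              cases pvVis s <;> simp [pvToCond]
            rw [hhead]
            refine ⟨by omega, hscan3, ?_⟩
            rcases hdisj with ⟨hr2, hfe⟩ | hfe
            · refine Or.inl ⟨hr2, ?_⟩
              rw [hface, List.foldl_cons, hstep]
              simpa [List.append_assoc] using hfe
            · refine Or.inr ?_
              rw [hface, List.foldl_cons, hstep, hfe]
              simp [List.append_assoc]
          | flag b =>
            have hbr2' : pvBranch dfs kds f t (pvVis s) (pvToCond (PPEntry.flag (!b))) = (more, rem2) := hbr2
            have hlen0' : t.length + 1 ≤ rest.length := by simpa using hlen0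
            obtain ⟨hlen2, hscan3, hdisj⟩ := ihB t d s (PPEntry.flag (!b))
              (out ++ em0) more rem2 (by omega) hscan2 hbr2'
            have hstep := pvA_else_flag dfs kds s (out ++ em0) l b hlif hlelse
            have hhead : (if pvToCond (PPEntry.flag b) == none && pvVis s then [l] else []) = ([] : List String) := by
              simp [pvToCond]
            rw [hhead]
            refine ⟨by omega, hscan3, ?_⟩
            rcases hdisj with ⟨hr2, hfe⟩ | hfe
            · refine Or.inl ⟨hr2, ?_⟩
              rw [hface, List.foldl_cons, hstep]
              simpa [List.append_assoc] using hfe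
            · refine Or.inr ?_
              rw [hface, List.foldl_cons, hstep, hfe]
              simp [List.append_assoc]
        · -- terminator of this branch: #endif — close the block
          subst hk0'
          dsimp only at heq
          simp only [Prod.mk.injEq] at heq
          obtain ⟨rfl, rfl⟩ := heq
          have hscan3 : pvPreScan t d = true := by
            rw [pvPreScan] at hsr0
            rw [if_neg (by simpa using hlif), if_neg (by simpa using hlelse), if_pos hlendif] at hsr0
            simp only [Bool.and_eq_true, decide_eq_true_eq] at hsr0
            simpa using hsr0.2
          have hlen0' : t.length + 1 ≤ rest.length := by simpa using hlen0
          refine ⟨by omega, hscan3, Or.inr ?_⟩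
          cases e with
          | keep =>
            have hstep := pvA_endif_keep dfs kds s (out ++ em0) l hlif hlelse hlendif
            rw [hface, List.foldl_cons, hstep]
            cases pvVis s <;> simp [pvToCond, List.append_assoc]
          | flag b =>
            have hstep := pvA_endif_flag dfs kds s (out ++ em0) l b hlif hlelse hlendif
            rw [hface, List.foldl_cons, hstep]
            simp [pvToCond]

-- ===== VERDICT (by name: the statement is the Claim_ definition above) =====
theorem preprocess_cs_file_spec : Claim_equal_preprocess_cs_file := by
  intro lines dfs kds _ hpre
  unfold Spec_preprocess_cs_file preprocess_cs_file preprocess_cs_file_alt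
  rcases hsq : pvSeq dfs kds (2 * lines.length + 1) lines true with ⟨em, rem, kind⟩
  have hv : pvVis ([] : List PPEntry) = true := rfl
  have hres := ((pv_mega dfs kds (2 * lines.length + 1)).1) lines 0 [] [] em rem kind
    (Nat.le_refl _) hpre (by rw [hv]; exact hsq)
  rcases hres.2 with ⟨_, _, hfold⟩ | ⟨_, hd, _⟩
  · simpa using hfold
  · exact absurd hd (by simp)
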